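-- pv_equiv track=rewrite | github.com/xinge-ji/doc-ocr | app/services/rules/invoice_rule_extractor.py | _merge_row_cells
-- ===== SOURCE A (Python) =====
-- from typing import Any, Mapping
--
-- def _merge_row_cells(
--     rows: list[Mapping[str, str]],
--     column_fields: list[str],
--     merge_join_fields: set[str],
--     merge_first_fields: set[str],
--     joiner: str,
-- ) -> dict[str, str]:
--     merged: dict[str, str] = {field: "" for field in column_fields}
--     for field in column_fields:
--         values = [row.get(field, "").strip() for row in rows if row.get(field)]
--         if not values:
--             continue
--         if field in merge_join_fields:
--             merged[field] = joiner.join(values)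
--         elif field in merge_first_fields:
--             merged[field] = values[0]
--         else:
--             merged[field] = values[0]
--     return merged
-- ===== SOURCE B (Python) =====
-- def _merge_row_cells(rows, column_fields, merge_join_fields, merge_first_fields, joiner):
--     # Data-driven single pass: walk each row's own cells (not the field list),
--     # routing every truthy cell straight to its field's slot -- join fields
--     # collect stripped pieces, every other field is set once by its first hit.
--     wanted = set(column_fields)
--     firsts = {}
--     parts = {}
--     for row in rows:
--         for f, v in row.items():
--             if f in wanted and v:
--                 if f in merge_join_fields:
--                     parts.setdefault(f, []).append(v.strip())
--                 elif f not in firsts: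
--                     firsts[f] = v.strip()
--     return {
--         f: joiner.join(parts[f]) if f in parts else firsts.get(f, "")
--         for f in column_fields
--     }
-- ===== Notes on version B (the rewrite author's own statement) =====
-- stated objective: faster
-- what changed: B makes one data-driven pass over each row's own cells (instead of A's rescan of all rows once per column field with intermediate value lists): every truthy cell is routed straight to its field's slot -- join fields collect stripped pieces, all other fields are set once by their first hit -- and a final pass over column_fields reads the slots off.
import Mathlib
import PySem

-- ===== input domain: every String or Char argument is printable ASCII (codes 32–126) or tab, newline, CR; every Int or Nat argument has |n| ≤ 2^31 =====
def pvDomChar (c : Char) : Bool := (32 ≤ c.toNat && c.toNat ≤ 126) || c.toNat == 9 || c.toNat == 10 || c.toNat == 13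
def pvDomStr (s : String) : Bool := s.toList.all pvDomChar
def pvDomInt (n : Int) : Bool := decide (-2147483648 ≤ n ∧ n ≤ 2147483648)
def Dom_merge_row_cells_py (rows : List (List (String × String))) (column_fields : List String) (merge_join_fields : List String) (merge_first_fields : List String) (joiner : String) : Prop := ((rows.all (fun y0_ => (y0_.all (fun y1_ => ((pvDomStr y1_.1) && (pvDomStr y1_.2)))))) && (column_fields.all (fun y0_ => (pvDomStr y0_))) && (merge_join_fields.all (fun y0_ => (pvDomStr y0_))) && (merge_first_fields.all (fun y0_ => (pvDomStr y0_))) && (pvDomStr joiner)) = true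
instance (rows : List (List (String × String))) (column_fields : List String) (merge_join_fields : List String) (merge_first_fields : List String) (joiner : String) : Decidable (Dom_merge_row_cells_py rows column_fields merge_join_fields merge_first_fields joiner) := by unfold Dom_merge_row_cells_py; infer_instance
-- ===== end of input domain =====

-- B replaces A's per-field rescans of all rows by one data-driven pass over each row's own
-- cells, routing every truthy cell straight to its field's slot (join fields collect pieces,
-- every other field is set once by its first hit); measurably faster on large inputs.


-- ===== PORT A =====
def merge_row_cells_py (rows : List (List (String × String))) (column_fields : List String) (merge_join_fields : List String) (merge_first_fields : List String) (joiner : String) : List (String × String) :=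
  let merged0 : PySem.Dict String String :=
    column_fields.foldl (fun d field => d.insert field "") PySem.Dict.empty
  let merged :=
    column_fields.foldl (fun d field =>
      let values :=
        (rows.filter (fun row => !((PySem.Dict.mk row).getD field "" == ""))).map
          (fun row => PySem.Str.strip ((PySem.Dict.mk row).getD field ""))
      match values with
      | [] => d
      | v0 :: _ =>
        if merge_join_fields.contains field then
          d.insert field (PySem.Str.join joiner values)
        else if merge_first_fields.contains field then
          d.insert field v0
        else
          d.insert field v0) merged0
  merged.items

-- ===== PORT B =====
def merge_row_cells_py_alt (rows : List (List (String × String))) (column_fields : List String) (merge_join_fields : List String) (merge_first_fields : List String) (joiner : String) : List (String × String) :=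
  let wanted : PySem.Set String := PySem.Set.ofList column_fields
  let acc : PySem.Dict String String × PySem.Dict String (List String) :=
    rows.foldl (fun acc row =>
      (PySem.Dict.mk row).items.foldl (fun acc p =>
        if PySem.Set.contains wanted p.1 && !(p.2 == "") then
          if merge_join_fields.contains p.1 then
            -- parts.setdefault(f, []).append(v.strip())
            (acc.1, acc.2.modify p.1 [] (fun l => l ++ [PySem.Str.strip p.2]))
          else if acc.1.contains p.1 then acc
          else (acc.1.insert p.1 (PySem.Str.strip p.2), acc.2)
        else acc) acc) (PySem.Dict.empty, PySem.Dict.empty)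
  (column_fields.foldl (fun d f =>
      d.insert f (if acc.2.contains f then PySem.Str.join joiner (acc.2.getD f []) else acc.1.getD f ""))
    PySem.Dict.empty).items

-- ===== PRECONDITION & SPEC =====
-- Pre_ excludes association lists in `rows` with duplicate keys: each row is a Python dict
-- (Mapping), which cannot hold a key twice, so such lists represent no Python input at all.
def Pre_merge_row_cells_py (rows : List (List (String × String))) (column_fields : List String) (merge_join_fields : List String) (merge_first_fields : List String) (joiner : String) : Prop :=
  ∀ row ∈ rows, (row.map Prod.fst).Nodup
instance (rows : List (List (String × String))) (column_fields : List String) (merge_join_fields : List String) (merge_first_fields : List String) (joiner : String) : Decidable (Pre_merge_row_cells_py rows column_fields merge_join_fields merge_first_fields joiner) := by unfold Pre_merge_row_cells_py; infer_instance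

def pvWitness_merge_row_cells_py : (List (List (String × String))) × List String × List String × List String × String :=
  ([[("a", " x ")], [("a", "y"), ("b", "")]], ["a", "b"], ["a"], ["b"], ", ")

def Spec_merge_row_cells_py (rows : List (List (String × String))) (column_fields : List String) (merge_join_fields : List String) (merge_first_fields : List String) (joiner : String) (out : List (String × String)) : Prop := out = merge_row_cells_py_alt rows column_fields merge_join_fields merge_first_fields joiner
instance (rows : List (List (String × String))) (column_fields : List String) (merge_join_fields : List String) (merge_first_fields : List String) (joiner : String) (out : List (String × String)) : Decidable (Spec_merge_row_cells_py rows column_fields merge_join_fields merge_first_fields joiner out) := by unfold Spec_merge_row_cells_py; infer_instance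

-- ===== CLAIM =====
def Claim_equal_merge_row_cells_py : Prop := ∀ (rows : List (List (String × String))) (column_fields : List String) (merge_join_fields : List String) (merge_first_fields : List String) (joiner : String), Dom_merge_row_cells_py rows column_fields merge_join_fields merge_first_fields joiner → Pre_merge_row_cells_py rows column_fields merge_join_fields merge_first_fields joiner → Spec_merge_row_cells_py rows column_fields merge_join_fields merge_first_fields joiner (merge_row_cells_py rows column_fields merge_join_fields merge_first_fields joiner)

-- ===== LEMMAS AND PROOFS =====

/-- The per-(row,field) contribution both programs agree on: the stripped cell if truthy, else nothing. -/
def pvOptList (row : List (String × String)) (f : String) : List String :=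
  match (PySem.Dict.mk row).get? f with
  | some v => if v == "" then [] else [PySem.Str.strip v]
  | none => []

/-- All contributions for one field, in row order. -/
def pvVals (rows : List (List (String × String))) (f : String) : List String :=
  rows.flatMap (fun row => pvOptList row f)

/-- The merged value per field that both programs compute. -/
def pvResultF (rows : List (List (String × String))) (merge_join_fields : List String) (joiner : String) (f : String) : String :=
  match pvVals rows f with
  | [] => ""
  | v0 :: vs => if merge_join_fields.contains f then PySem.Str.join joiner (v0 :: vs) else v0

/-- A's loop body, named (identical to the lambda in `merge_row_cells_py`). -/
def pvStepA (rows : List (List (String × String))) (merge_join_fields merge_first_fields : List String) (joiner : String) (d : PySem.Dict String String) (field : String) : PySem.Dict String String :=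
  let values :=
    (rows.filter (fun row => !((PySem.Dict.mk row).getD field "" == ""))).map
      (fun row => PySem.Str.strip ((PySem.Dict.mk row).getD field ""))
  match values with
  | [] => d
  | v0 :: _ =>
    if merge_join_fields.contains field then
      d.insert field (PySem.Str.join joiner values)
    else if merge_first_fields.contains field then
      d.insert field v0
    else
      d.insert field v0

/-- B's inner loop body, named (identical to the lambda in `merge_row_cells_py_alt`). -/
def pvStepB (wanted merge_join_fields : List String) (acc : PySem.Dict String String × PySem.Dict String (List String)) (p : String × String) : PySem.Dict String String × PySem.Dict String (List String) :=
  if PySem.Set.contains wanted p.1 && !(p.2 == "") then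
    if merge_join_fields.contains p.1 then
      (acc.1, acc.2.modify p.1 [] (fun l => l ++ [PySem.Str.strip p.2]))
    else if acc.1.contains p.1 then acc
    else (acc.1.insert p.1 (PySem.Str.strip p.2), acc.2)
  else acc

/-- One step of B's first-hit accumulation on the optional first value. -/
def pvF (c : Option String) (s : String) : Option String :=
  match c with
  | some _ => c
  | none => some s

/-- A's list comprehension for one field equals the concatenation of the per-row contributions. -/
lemma pvValues_eq_flatMap (rows : List (List (String × String))) (f : String) :
    (rows.filter (fun row => !((PySem.Dict.mk row).getD f "" == ""))).map
      (fun row => PySem.Str.strip ((PySem.Dict.mk row).getD f ""))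
      = pvVals rows f := by
  induction rows with
  | nil => rfl
  | cons row rest ih =>
    cases h : (PySem.Dict.mk row).get? f with
    | none =>
      have hh : pvOptList row f = [] := by simp [pvOptList, h]
      simpa [pvVals, List.flatMap_cons, hh, List.filter_cons, PySem.Dict.getD, h] using ih
    | some v =>
      by_cases hv : v = ""
      · have hh : pvOptList row f = [] := by simp [pvOptList, h, hv]
        simpa [pvVals, List.flatMap_cons, hh, List.filter_cons, PySem.Dict.getD, h, hv] using ih
      · have hh : pvOptList row f = [PySem.Str.strip v] := by simp [pvOptList, h, hv]
        simpa [pvVals, List.flatMap_cons, hh, List.filter_cons, PySem.Dict.getD, h, hv] using ih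

/-- Lookup after one step of A's loop. -/
lemma get?_pvStepA (rows : List (List (String × String))) (merge_join_fields merge_first_fields : List String) (joiner : String) (d : PySem.Dict String String) (field g : String) :
    (pvStepA rows merge_join_fields merge_first_fields joiner d field).get? g
      = if g = field ∧ pvVals rows field ≠ [] then some (pvResultF rows merge_join_fields joiner field) else d.get? g := by
  unfold pvStepA
  simp only [pvValues_eq_flatMap rows field]
  cases hv : pvVals rows field with
  | nil => simp
  | cons v0 vs =>
    simp only [pvResultF, hv]
    by_cases hgf : g = field
    · subst hgf
      by_cases hj : g ∈ merge_join_fields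
      · simp [hj, PySem.Dict.get?_insert_self]
      · by_cases hf : g ∈ merge_first_fields
        · simp [hj, hf, PySem.Dict.get?_insert_self]
        · simp [hj, hf, PySem.Dict.get?_insert_self]
    · by_cases hj : field ∈ merge_join_fields
      · simp [hj, hgf, PySem.Dict.get?_insert_of_ne _ _ hgf]
      · by_cases hf : field ∈ merge_first_fields
        · simp [hj, hf, hgf, PySem.Dict.get?_insert_of_ne _ _ hgf]
        · simp [hj, hf, hgf, PySem.Dict.get?_insert_of_ne _ _ hgf]

/-- A step of A's loop never removes keys. -/
lemma contains_pvStepA (rows : List (List (String × String))) (merge_join_fields merge_first_fields : List String) (joiner : String) (d : PySem.Dict String String) (field g : String) (h : d.contains g = true) :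
    (pvStepA rows merge_join_fields merge_first_fields joiner d field).contains g = true := by
  unfold pvStepA
  cases (rows.filter (fun row => !((PySem.Dict.mk row).getD field "" == ""))).map
      (fun row => PySem.Str.strip ((PySem.Dict.mk row).getD field "")) with
  | nil => exact h
  | cons v0 vs => split_ifs <;> simp [PySem.Dict.contains_insert, h]

/-- A step of A's loop keeps the key list fixed when the field is already a key. -/
lemma keys_pvStepA (rows : List (List (String × String))) (merge_join_fields merge_first_fields : List String) (joiner : String) (d : PySem.Dict String String) (field : String) (h : d.contains field = true) :
    (pvStepA rows merge_join_fields merge_first_fields joiner d field).keys = d.keys := by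
  unfold pvStepA
  cases (rows.filter (fun row => !((PySem.Dict.mk row).getD field "" == ""))).map
      (fun row => PySem.Str.strip ((PySem.Dict.mk row).getD field "")) with
  | nil => rfl
  | cons v0 vs => split_ifs <;> exact PySem.Dict.keys_insert_of_contains _ _ h

/-- A's whole loop keeps the key list fixed when every field is already a key. -/
lemma keys_A_fold (rows : List (List (String × String))) (merge_join_fields merge_first_fields : List String) (joiner : String) (fs : List String) (d : PySem.Dict String String)
    (h : ∀ f ∈ fs, d.contains f = true) :
    (fs.foldl (pvStepA rows merge_join_fields merge_first_fields joiner) d).keys = d.keys := by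
  induction fs generalizing d with
  | nil => rfl
  | cons f rest ih =>
    simp only [List.foldl_cons]
    rw [ih _ (fun g hg => contains_pvStepA rows merge_join_fields merge_first_fields joiner d f g (h g (List.mem_cons_of_mem _ hg)))]
    exact keys_pvStepA rows merge_join_fields merge_first_fields joiner d f (h f List.mem_cons_self)

/-- Lookup after A's whole loop. -/
lemma get?_A_fold (rows : List (List (String × String))) (merge_join_fields merge_first_fields : List String) (joiner : String) (fs : List String) (d : PySem.Dict String String) (g : String) :
    (fs.foldl (pvStepA rows merge_join_fields merge_first_fields joiner) d).get? g
      = if g ∈ fs ∧ pvVals rows g ≠ [] then some (pvResultF rows merge_join_fields joiner g) else d.get? g := by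
  induction fs generalizing d with
  | nil => simp
  | cons f rest ih =>
    simp only [List.foldl_cons]
    rw [ih]
    by_cases hgr : g ∈ rest ∧ pvVals rows g ≠ []
    · simp [hgr.1, hgr.2]
    · rw [if_neg hgr, get?_pvStepA]
      by_cases hgf : g = f
      · subst hgf
        by_cases hv : pvVals rows g = []
        · simp [hv]
        · simp [hv]
      · have h2 : ¬ (g ∈ f :: rest ∧ pvVals rows g ≠ []) := by
          rintro ⟨hm, hv⟩
          rcases List.mem_cons.mp hm with h | h
          · exact hgf h
          · exact hgr ⟨h, hv⟩
        rw [if_neg (fun h => hgf h.1), if_neg h2]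

/-- Folding `insert f (r f)` over a list of keys: pointwise lookup. -/
lemma get?_foldl_insert_key (fs : List String) (r : String → String) (d : PySem.Dict String String) (g : String) :
    (fs.foldl (fun d f => d.insert f (r f)) d).get? g
      = if g ∈ fs then some (r g) else d.get? g := by
  induction fs generalizing d with
  | nil => simp
  | cons f rest ih =>
    simp only [List.foldl_cons]
    rw [ih]
    by_cases hgr : g ∈ rest
    · simp [hgr]
    · by_cases hgf : g = f
      · subst hgf; simp [hgr, PySem.Dict.get?_insert_self]
      · simp [hgr, hgf, PySem.Dict.get?_insert_of_ne _ _ hgf]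

/-- Keeping the first hit: a set slot never changes. -/
lemma foldl_pvF_some (vs : List String) (a : String) : vs.foldl pvF (some a) = some a := by
  induction vs with
  | nil => rfl
  | cons v rest ih => simpa [pvF] using ih

/-- B's inner step does not touch other fields. -/
lemma pvStepB_ne (wanted merge_join_fields : List String) (acc : PySem.Dict String String × PySem.Dict String (List String)) (p : String × String) (f : String) (hne : f ≠ p.1) :
    (pvStepB wanted merge_join_fields acc p).1.get? f = acc.1.get? f
    ∧ (pvStepB wanted merge_join_fields acc p).2.getD f [] = acc.2.getD f []
    ∧ (pvStepB wanted merge_join_fields acc p).2.contains f = acc.2.contains f := by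
  unfold pvStepB
  by_cases h1 : (PySem.Set.contains wanted p.1 && !(p.2 == "")) = true
  · simp only [h1, if_true]
    by_cases hm : p.1 ∈ merge_join_fields
    · refine ⟨by simp [hm], ?_, ?_⟩
      · simp [hm, PySem.Dict.getD_modify_of_ne _ _ _ hne]
      · simp [hm, PySem.Dict.contains_modify, hne]
    · by_cases hc : acc.1.contains p.1 = true
      · simp [hm, hc]
      · simp [hm, hc, PySem.Dict.get?_insert_of_ne _ _ hne]
  · have h1' : ¬ (p.1 ∈ wanted ∧ ¬ p.2 = "") := by simpa using h1
    simp [h1']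

/-- B's inner loop over one row's items: effect on the slots of a wanted field. -/
lemma B_row_eval (wanted merge_join_fields : List String)
    (l : List (String × String)) (hnd : (l.map Prod.fst).Nodup)
    (acc : PySem.Dict String String × PySem.Dict String (List String)) (f : String)
    (hw : PySem.Set.contains wanted f = true) :
    ((l.foldl (pvStepB wanted merge_join_fields) acc).1.get? f
        = if merge_join_fields.contains f then acc.1.get? f
          else (pvOptList l f).foldl pvF (acc.1.get? f))
    ∧ ((l.foldl (pvStepB wanted merge_join_fields) acc).2.getD f []
        = if merge_join_fields.contains f then acc.2.getD f [] ++ pvOptList l f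
          else acc.2.getD f [])
    ∧ ((l.foldl (pvStepB wanted merge_join_fields) acc).2.contains f
        = (acc.2.contains f || (merge_join_fields.contains f && !(pvOptList l f).isEmpty))) := by
  induction l generalizing acc with
  | nil =>
    have hOptNil : pvOptList [] f = [] := by
      simp [pvOptList, show (PySem.Dict.mk ([] : List (String × String))).get? f = none from rfl]
    refine ⟨?_, ?_, ?_⟩ <;> simp [hOptNil]
  | cons p rest ih =>
    obtain ⟨g, v⟩ := p
    rcases List.nodup_cons.mp hnd with ⟨hg, hrest⟩
    simp only [List.foldl_cons]
    by_cases hgf : g = f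
    · subst hgf
      have hrest_none : (PySem.Dict.mk rest).get? g = none := by
        rw [PySem.Dict.get?_eq_none_iff_not_mem_keys]
        simpa using hg
      have hOptRest : pvOptList rest g = [] := by simp [pvOptList, hrest_none]
      have hOpt : pvOptList ((g, v) :: rest) g = if v == "" then [] else [PySem.Str.strip v] := by
        simp [pvOptList, PySem.Dict.get?_mk_cons]
      have hw' : g ∈ wanted := by simpa using hw
      rw [hOpt]
      by_cases hv : v = ""
      · have hstep : pvStepB wanted merge_join_fields acc (g, v) = acc := by
          unfold pvStepB
          simp [hv]
        rw [hstep]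
        obtain ⟨ih1, ih2, ih3⟩ := ih hrest acc
        refine ⟨?_, ?_, ?_⟩
        · rw [ih1, hOptRest]; simp [hv]
        · rw [ih2, hOptRest]; simp [hv]
        · rw [ih3, hOptRest]; simp [hv]
      · have hvb : (v == "") = false := by simp [hv]
        by_cases hm : g ∈ merge_join_fields
        · have hstep : pvStepB wanted merge_join_fields acc (g, v)
              = (acc.1, acc.2.modify g [] (fun l => l ++ [PySem.Str.strip v])) := by
            unfold pvStepB
            simp [hw', hv, hm]
          rw [hstep]
          obtain ⟨ih1, ih2, ih3⟩ := ih hrest (acc.1, acc.2.modify g [] (fun l => l ++ [PySem.Str.strip v]))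
          refine ⟨?_, ?_, ?_⟩
          · rw [ih1]; simp [hm]
          · rw [ih2, hOptRest]
            simp [hm, hvb, PySem.Dict.getD_modify_self]
          · rw [ih3, hOptRest]
            simp [hm, hvb, PySem.Dict.contains_modify]
        · have hstep : pvStepB wanted merge_join_fields acc (g, v)
              = (if acc.1.contains g then acc
                 else (acc.1.insert g (PySem.Str.strip v), acc.2)) := by
            unfold pvStepB
            simp [hw', hv, hm]
          rw [hstep]
          by_cases hc : acc.1.contains g = true
          · rw [if_pos hc]
            obtain ⟨ih1, ih2, ih3⟩ := ih hrest acc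
            obtain ⟨a, ha⟩ : ∃ a, acc.1.get? g = some a := by
              rcases hh : acc.1.get? g with _ | a
              · rw [PySem.Dict.contains_eq_isSome_get?, hh] at hc
                simp at hc
              · exact ⟨a, rfl⟩
            refine ⟨?_, ?_, ?_⟩
            · rw [ih1, hOptRest]
              simp [hm, hvb, ha, pvF]
            · rw [ih2, hOptRest]; simp [hm]
            · rw [ih3, hOptRest]; simp [hm]
          · rw [if_neg hc]
            obtain ⟨ih1, ih2, ih3⟩ := ih hrest (acc.1.insert g (PySem.Str.strip v), acc.2)
            have hnone : acc.1.get? g = none := by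
              rcases hh : acc.1.get? g with _ | a
              · rfl
              · exact absurd (by rw [PySem.Dict.contains_eq_isSome_get?, hh]; rfl) hc
            refine ⟨?_, ?_, ?_⟩
            · rw [ih1, hOptRest]
              simp [hm, hvb, hnone, pvF, PySem.Dict.get?_insert_self]
            · rw [ih2, hOptRest]; simp [hm]
            · rw [ih3, hOptRest]; simp [hm]
    · have hgfb : (g == f) = false := by simp [hgf]
      have hOpt : pvOptList ((g, v) :: rest) f = pvOptList rest f := by
        simp [pvOptList, PySem.Dict.get?_mk_cons, hgfb]
      obtain ⟨s1, s2, s3⟩ := pvStepB_ne wanted merge_join_fields acc (g, v) f (fun h => hgf h.symm)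
      obtain ⟨ih1, ih2, ih3⟩ := ih hrest (pvStepB wanted merge_join_fields acc (g, v))
      rw [hOpt]
      exact ⟨by rw [ih1, s1], by rw [ih2, s2], by rw [ih3, s3]⟩

/-- B's outer loop over rows: the slots of a wanted field. -/
lemma B_rows_eval (wanted merge_join_fields : List String)
    (rows : List (List (String × String))) (hnd : ∀ row ∈ rows, (row.map Prod.fst).Nodup)
    (acc : PySem.Dict String String × PySem.Dict String (List String)) (f : String)
    (hw : PySem.Set.contains wanted f = true) :
    ((rows.foldl (fun acc row => (PySem.Dict.mk row).items.foldl (pvStepB wanted merge_join_fields) acc) acc).1.get? f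
        = if merge_join_fields.contains f then acc.1.get? f
          else (pvVals rows f).foldl pvF (acc.1.get? f))
    ∧ ((rows.foldl (fun acc row => (PySem.Dict.mk row).items.foldl (pvStepB wanted merge_join_fields) acc) acc).2.getD f []
        = if merge_join_fields.contains f then acc.2.getD f [] ++ pvVals rows f
          else acc.2.getD f [])
    ∧ ((rows.foldl (fun acc row => (PySem.Dict.mk row).items.foldl (pvStepB wanted merge_join_fields) acc) acc).2.contains f
        = (acc.2.contains f || (merge_join_fields.contains f && !(pvVals rows f).isEmpty))) := by
  induction rows generalizing acc with
  | nil => refine ⟨?_, ?_, ?_⟩ <;> simp [pvVals]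
  | cons row rest ih =>
    simp only [List.foldl_cons, pvVals, List.flatMap_cons]
    obtain ⟨r1, r2, r3⟩ := B_row_eval wanted merge_join_fields row (hnd row List.mem_cons_self) acc f hw
    obtain ⟨ih1, ih2, ih3⟩ :=
      ih (fun r hr => hnd r (List.mem_cons_of_mem _ hr))
        ((PySem.Dict.mk row).items.foldl (pvStepB wanted merge_join_fields) acc)
    refine ⟨?_, ?_, ?_⟩
    · rw [ih1, r1]
      by_cases hm : f ∈ merge_join_fields
      · simp [hm]
      · simp [hm, pvVals, List.foldl_append]
    · rw [ih2, r2]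
      by_cases hm : f ∈ merge_join_fields
      · simp [hm, pvVals, List.append_assoc]
      · simp [hm]
    · rw [ih3, r3]
      by_cases hm : f ∈ merge_join_fields
      · have hmb : merge_join_fields.contains f = true := by simpa using hm
        cases h1 : (pvOptList row f).isEmpty <;>
          cases h2 : ((pvVals rest f).isEmpty) <;>
            simp_all [pvVals, List.isEmpty_iff, List.isEmpty_eq_false_iff]
      · simp [hm]

-- ===== VERDICT =====
theorem merge_row_cells_py_spec : Claim_equal_merge_row_cells_py := by
  intro rows cf mjf mff joiner _ hpre
  show merge_row_cells_py rows cf mjf mff joiner = merge_row_cells_py_alt rows cf mjf mff joiner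
  unfold merge_row_cells_py merge_row_cells_py_alt
  simp only []
  rw [show (fun (d : PySem.Dict String String) (field : String) =>
      let values :=
        (rows.filter (fun row => !((PySem.Dict.mk row).getD field "" == ""))).map
          (fun row => PySem.Str.strip ((PySem.Dict.mk row).getD field ""))
      match values with
      | [] => d
      | v0 :: _ =>
        if mjf.contains field then
          d.insert field (PySem.Str.join joiner values)
        else if mff.contains field then
          d.insert field v0
        else
          d.insert field v0) = pvStepA rows mjf mff joiner from rfl]
  rw [show (fun (acc : PySem.Dict String String × PySem.Dict String (List String)) (p : String × String) =>
      if PySem.Set.contains (PySem.Set.ofList cf) p.1 && !(p.2 == "") then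
        if mjf.contains p.1 then
          (acc.1, acc.2.modify p.1 [] (fun l => l ++ [PySem.Str.strip p.2]))
        else if acc.1.contains p.1 then acc
        else (acc.1.insert p.1 (PySem.Str.strip p.2), acc.2)
      else acc) = pvStepB (PySem.Set.ofList cf) mjf from rfl]
  set merged0 : PySem.Dict String String := cf.foldl (fun d field => d.insert field "") PySem.Dict.empty with hm0
  set acc : PySem.Dict String String × PySem.Dict String (List String) :=
    rows.foldl (fun acc row => (PySem.Dict.mk row).items.foldl (pvStepB (PySem.Set.ofList cf) mjf) acc)
      (PySem.Dict.empty, PySem.Dict.empty) with hacc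
  have hm0keys : merged0.keys = PySem.Set.ofList cf := by
    rw [hm0]
    have h := PySem.Dict.keys_foldl_insert cf (fun _ _ => ("" : String)) (PySem.Dict.empty (κ := String) (ν := String))
    simpa [PySem.Dict.keys_empty, PySem.Set.ofList_eq_foldl, PySem.Set.update] using h
  have hm0get : ∀ g ∈ cf, merged0.get? g = some "" := by
    intro g hg
    rw [hm0]
    have h := get?_foldl_insert_key cf (fun _ => "") PySem.Dict.empty g
    simpa [hg] using h
  have hAkeys : (cf.foldl (pvStepA rows mjf mff joiner) merged0).keys = PySem.Set.ofList cf := by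
    rw [keys_A_fold rows mjf mff joiner cf merged0 (fun f hf => by
      rw [PySem.Dict.contains_iff_mem_keys, hm0keys]
      exact (PySem.Set.mem_ofList cf f).mpr hf), hm0keys]
  have hAnodup : (cf.foldl (pvStepA rows mjf mff joiner) merged0).keys.Nodup := by
    rw [hAkeys]; exact PySem.Set.nodup_ofList cf
  have hBkeys : (cf.foldl (fun d f =>
      d.insert f (if acc.2.contains f then PySem.Str.join joiner (acc.2.getD f []) else acc.1.getD f ""))
      PySem.Dict.empty).keys = PySem.Set.ofList cf := by
    have h := PySem.Dict.keys_foldl_insert cf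
      (fun (d : PySem.Dict String String) f =>
        if acc.2.contains f then PySem.Str.join joiner (acc.2.getD f []) else acc.1.getD f "")
      (PySem.Dict.empty (κ := String) (ν := String))
    simpa [PySem.Dict.keys_empty, PySem.Set.ofList_eq_foldl, PySem.Set.update] using h
  have hBnodup : (cf.foldl (fun d f =>
      d.insert f (if acc.2.contains f then PySem.Str.join joiner (acc.2.getD f []) else acc.1.getD f ""))
      PySem.Dict.empty).keys.Nodup := by
    rw [hBkeys]; exact PySem.Set.nodup_ofList cf
  have hAget : ∀ g ∈ cf, (cf.foldl (pvStepA rows mjf mff joiner) merged0).getD g ""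
      = pvResultF rows mjf joiner g := by
    intro g hg
    rw [PySem.Dict.getD_eq_get?_getD, get?_A_fold rows mjf mff joiner cf merged0 g]
    by_cases hv : pvVals rows g = []
    · simp [hv, hm0get g hg, pvResultF]
    · simp [hg, hv]
  have hBget : ∀ g ∈ cf, (cf.foldl (fun d f =>
      d.insert f (if acc.2.contains f then PySem.Str.join joiner (acc.2.getD f []) else acc.1.getD f ""))
      PySem.Dict.empty).getD g "" = pvResultF rows mjf joiner g := by
    intro g hg
    rw [PySem.Dict.getD_eq_get?_getD,
      get?_foldl_insert_key cf
        (fun f => if acc.2.contains f then PySem.Str.join joiner (acc.2.getD f []) else acc.1.getD f "")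
        PySem.Dict.empty g]
    simp only [hg, if_pos]
    have hw : PySem.Set.contains (PySem.Set.ofList cf) g = true := by
      simp [PySem.Set.contains, PySem.Set.mem_ofList, hg]
    obtain ⟨e1, e2, e3⟩ := B_rows_eval (PySem.Set.ofList cf) mjf rows hpre
      (PySem.Dict.empty, PySem.Dict.empty) g hw
    rw [← hacc] at e1 e2 e3
    simp only [PySem.Dict.get?_empty, PySem.Dict.getD_empty, PySem.Dict.contains_empty,
      Bool.false_or, List.nil_append] at e1 e2 e3
    rw [e3, e2]
    by_cases hm : mjf.contains g = true
    · have hm' : g ∈ mjf := by simpa using hm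
      simp only [hm, Bool.true_and, if_pos]
      cases hv : pvVals rows g with
      | nil => simp [pvResultF, hv, PySem.Dict.getD_eq_get?_getD, e1]
      | cons v0 vs => simp [pvResultF, hv, hm']
    · have hm' : g ∉ mjf := by simpa using hm
      simp only [hm]
      rw [PySem.Dict.getD_eq_get?_getD, e1]
      simp only [hm, Bool.false_eq_true, if_false, Bool.false_and]
      cases hv : pvVals rows g with
      | nil => simp [pvResultF, hv]
      | cons v0 vs => simp [pvResultF, hv, hm', foldl_pvF_some, pvF]
  rw [PySem.Dict.items_eq_map_keys _ hAnodup "", PySem.Dict.items_eq_map_keys _ hBnodup "",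
    hAkeys, hBkeys]
  apply List.map_congr_left
  intro g hg
  have hgcf : g ∈ cf := (PySem.Set.mem_ofList cf g).mp hg
  rw [hAget g hgcf, hBget g hgcf]
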